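-- pv_equiv track=rewrite | github.com/SibiChakravarthy7311/AbelianStringMatching_ADS | AbelianPatternMatching.py | tableCountingAbelianMatchingAlphabetReducedRedux
-- ===== SOURCE A (Python) =====
-- def computeTableMapping(alphabets):
--     table = [-1] * 123
--     value = 1
--     for alphabet in alphabets:
--         table[ord(alphabet)] = value
--         value <<= 1
--     return table
--
-- def tableCountingAbelianMatchingAlphabetReducedRedux(y, x, m, n):
--     alphabets = list(set(x))
--     alphabets.sort()
--     table = computeTableMapping(alphabets)
--     a = b = 0
--     indices = []
--     for i in range(m):
--         a = a + table[ord(x[i])]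
--         b = b + table[ord(y[i])]
--     difference = a - b
--     if not difference:
--         indices.append(0)
--     right = m
--     left = 0
--     while right < n:
--         difference += table[ord(x[right])] - table[ord(x[left])]
--         left += 1
--         if not difference:
--             indices.append(left)
--         right += 1
--     return indices
-- ===== SOURCE B (Python) =====
-- def computeTableMapping(alphabets):
--     table = [-1] * 123
--     value = 1
--     for alphabet in alphabets:
--         table[ord(alphabet)] = value
--         value <<= 1
--     return table
--
-- def tableCountingAbelianMatchingAlphabetReducedRedux(y, x, m, n):
--     table = computeTableMapping(sorted(set(x)))
--     prefix = [0]
--     s = 0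
--     for c in x:
--         s += table[ord(c)]
--         prefix.append(s)
--     patternSum = sum(table[ord(y[i])] for i in range(m))
--     # The first window x[0:m] is compared outright; every later start is
--     # checked through the prefix sums while it stays within the text bound n.
--     matches = [0] if prefix[m] == patternSum else []
--     matches += [left for left in range(1, n - m + 1)
--                 if prefix[left + m] - prefix[left] == patternSum]
--     return matches
-- ===== Notes on version B (the rewrite author's own statement) =====
-- stated objective: alternative
-- what changed: Replaces A's sliding-window while-loop that maintains (left, right, difference) state by a prefix-sum array over x plus a single pattern sum: the first window is compared directly and every later start by a prefix-sum difference; Pre_ excludes inputs where A raises IndexError (character codes >= 123, or m/n beyond the string lengths) and negative m, outside the natural domain (m is the pattern length), where A's value rests on Python's negative-index wraparound.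
-- outside the precondition, e.g. on tableCountingAbelianMatchingAlphabetReducedRedux('', 'a', -1, 0): A returns [0, 1], B returns []
import Mathlib
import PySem

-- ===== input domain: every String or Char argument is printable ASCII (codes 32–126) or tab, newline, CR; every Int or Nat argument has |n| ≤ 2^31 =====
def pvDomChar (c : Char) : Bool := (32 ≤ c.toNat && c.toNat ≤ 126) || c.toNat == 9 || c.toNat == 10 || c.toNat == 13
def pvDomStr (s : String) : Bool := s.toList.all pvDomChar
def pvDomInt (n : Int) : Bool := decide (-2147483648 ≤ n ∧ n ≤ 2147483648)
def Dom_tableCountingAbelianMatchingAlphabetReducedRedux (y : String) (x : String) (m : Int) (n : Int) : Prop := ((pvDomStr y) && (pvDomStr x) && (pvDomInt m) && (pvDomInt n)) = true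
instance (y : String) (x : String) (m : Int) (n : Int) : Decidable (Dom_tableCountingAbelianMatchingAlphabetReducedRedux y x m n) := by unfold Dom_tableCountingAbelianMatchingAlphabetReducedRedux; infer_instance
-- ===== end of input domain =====

-- B replaces A's sliding (left,right,difference) while-loop by a prefix-sum array and a
-- comprehension over window start positions (objective: alternative; same weighted-sum semantics).

-- ===== PORT A =====
-- helper shared verbatim by Source A and Source B
def computeTableMapping (alphabets : List Char) : List Int :=
  (alphabets.foldl
    (fun (tv : List Int × Int) c => (PySem.List.pySetD tv.1 (Int.ofNat c.toNat) tv.2, tv.2 <<< (1 : Nat)))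
    (List.replicate 123 (-1 : Int), 1)).1

-- table[ord(c)] (total form; the Python IndexError on codes ≥ 123 is excluded by Pre_)
def pvW (table : List Int) (c : Char) : Int :=
  (PySem.List.pyGet? table (Int.ofNat c.toNat)).getD 0

-- table[ord(xs[i])] (total form of the two chained indexings; raises are excluded by Pre_)
def pvCharW (table : List Int) (xs : List Char) (i : Int) : Int :=
  ((PySem.List.pyGet? xs i).map (pvW table)).getD 0

-- the 'while right < n' loop of A
def pvLoopA (table : List Int) (xs : List Char) (n right left difference : Int)
    (indices : List Int) : List Int :=
  if _h : right < n then
    let d := difference + (pvCharW table xs right - pvCharW table xs left)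
    pvLoopA table xs n (right + 1) (left + 1) d
      (if d = 0 then indices ++ [left + 1] else indices)
  else indices
termination_by (n - right).toNat
decreasing_by omega

def tableCountingAbelianMatchingAlphabetReducedRedux (y : String) (x : String) (m : Int) (n : Int) : List Int :=
  let alphabets := PySem.List.sorted (PySem.Set.ofList x.toList) (fun c => c) false
  let table := computeTableMapping alphabets
  let xs := x.toList
  let ys := y.toList
  let ab := (PySem.List.pyRange 0 m 1).foldl
    (fun (p : Int × Int) i => (p.1 + pvCharW table xs i, p.2 + pvCharW table ys i)) (0, 0)
  let difference := ab.1 - ab.2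
  let indices : List Int := if difference = 0 then [0] else []
  pvLoopA table xs n m 0 difference indices

-- ===== PORT B =====
def tableCountingAbelianMatchingAlphabetReducedRedux_alt (y : String) (x : String) (m : Int) (n : Int) : List Int :=
  let alphabets := PySem.List.sorted (PySem.Set.ofList x.toList) (fun c => c) false
  let table := computeTableMapping alphabets
  let xs := x.toList
  let ys := y.toList
  let sp := xs.foldl
    (fun (sp : Int × List Int) c => (sp.1 + pvW table c, sp.2 ++ [sp.1 + pvW table c]))
    (0, [(0 : Int)])
  let prefixSums := sp.2
  let patternSum := (PySem.List.pyRange 0 m 1).foldl (fun s i => s + pvCharW table ys i) 0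
  let hits : List Int := if ((PySem.List.pyGet? prefixSums m).getD 0 == patternSum) then [0] else []
  hits ++ (PySem.List.pyRange 1 (n - m + 1) 1).filter
    (fun l => (PySem.List.pyGet? prefixSums (l + m)).getD 0 - (PySem.List.pyGet? prefixSums l).getD 0 == patternSum)

-- ===== PRECONDITION & SPEC =====
-- Pre_ excludes exactly (a) inputs where A raises IndexError (a character with code ≥ 123 in x
-- or in y[0:m], past the end of the 123-entry table; m or n beyond the string lengths) and
-- (b) negative m, outside the natural domain (m is the pattern length), where A's value rests
-- on Python's accidental negative-index wraparound into x.
def Pre_tableCountingAbelianMatchingAlphabetReducedRedux (y : String) (x : String) (m : Int) (n : Int) : Prop :=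
  0 ≤ m ∧ m ≤ (y.toList.length : Int) ∧ m ≤ (x.toList.length : Int) ∧
  (m < n → n ≤ (x.toList.length : Int)) ∧
  x.toList.all (fun c => decide (c.toNat ≤ 122)) = true ∧
  (y.toList.take m.toNat).all (fun c => decide (c.toNat ≤ 122)) = true
instance (y : String) (x : String) (m : Int) (n : Int) : Decidable (Pre_tableCountingAbelianMatchingAlphabetReducedRedux y x m n) := by unfold Pre_tableCountingAbelianMatchingAlphabetReducedRedux; infer_instance

def pvWitness_tableCountingAbelianMatchingAlphabetReducedRedux : String × String × Int × Int := ("ab", "aab", 2, 3)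

def Spec_tableCountingAbelianMatchingAlphabetReducedRedux (y : String) (x : String) (m : Int) (n : Int) (out : List Int) : Prop := out = tableCountingAbelianMatchingAlphabetReducedRedux_alt y x m n
instance (y : String) (x : String) (m : Int) (n : Int) (out : List Int) : Decidable (Spec_tableCountingAbelianMatchingAlphabetReducedRedux y x m n out) := by unfold Spec_tableCountingAbelianMatchingAlphabetReducedRedux; infer_instance

-- ===== CLAIM (what is proved, stated in full; the proofs are below) =====
def Claim_equal_tableCountingAbelianMatchingAlphabetReducedRedux : Prop := ∀ (y : String) (x : String) (m : Int) (n : Int), Dom_tableCountingAbelianMatchingAlphabetReducedRedux y x m n → Pre_tableCountingAbelianMatchingAlphabetReducedRedux y x m n → Spec_tableCountingAbelianMatchingAlphabetReducedRedux y x m n (tableCountingAbelianMatchingAlphabetReducedRedux y x m n)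

-- ===== LEMMAS AND PROOFS =====

-- weighted prefix sum: sum of table weights over xs[0:k]
def pvWsum (w : Char → Int) (xs : List Char) (k : Int) : Int := ((xs.take k.toNat).map w).sum

lemma pvWsum_zero (w : Char → Int) (xs : List Char) : pvWsum w xs 0 = 0 := by
  simp [pvWsum]

lemma pvWsum_step (w : Char → Int) (xs : List Char) (k : Int) (h0 : 0 ≤ k)
    (h1 : k.toNat < xs.length) :
    pvWsum w xs (k + 1) = pvWsum w xs k + w xs[k.toNat] := by
  unfold pvWsum
  rw [show (k + 1).toNat = k.toNat + 1 from by omega]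
  rw [List.take_add_one, List.getElem?_eq_getElem h1, List.map_append, List.sum_append]
  simp

lemma pvCharW_eq (table : List Int) (xs : List Char) (i : Int) (h0 : 0 ≤ i)
    (h1 : i.toNat < xs.length) :
    pvCharW table xs i = pvW table xs[i.toNat] := by
  simp [pvCharW, PySem.List.pyGet?_of_nonneg xs h0, List.getElem?_eq_getElem h1]

lemma pvMapRangeNat (table : List Int) (xs : List Char) :
    ∀ (k : Nat), k ≤ xs.length →
      (PySem.List.pyRange 0 (k : Int) 1).map (fun i => pvCharW table xs i)
        = (xs.take k).map (pvW table) := by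
  intro k
  induction k with
  | zero => intro _; simp [PySem.List.pyRange_one_eq_nil (by omega : (0:Int) ≤ 0)]
  | succ k ih =>
    intro hk
    have hk' : k ≤ xs.length := by omega
    have hcast : ((k + 1 : Nat) : Int) = (k : Int) + 1 := by push_cast; ring
    rw [hcast, PySem.List.pyRange_one_succ_right (by positivity), List.map_append, ih hk',
      List.take_add_one, List.getElem?_eq_getElem (by omega : k < xs.length), List.map_append]
    simp [pvCharW_eq table xs (k : Int) (by omega) (by omega)]

lemma pvPrefixFold (w : Char → Int) (xs : List Char) :
    xs.foldl (fun (sp : Int × List Int) c => (sp.1 + w c, sp.2 ++ [sp.1 + w c])) (0, [(0:Int)])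
      = ((xs.map w).sum,
         (List.range (xs.length + 1)).map (fun i => ((xs.take i).map w).sum)) := by
  induction xs using List.reverseRecOn with
  | nil => simp [List.range_succ]
  | append_singleton xs c ih =>
    rw [List.foldl_append, ih]
    simp only [List.foldl_cons, List.foldl_nil]
    refine Prod.ext (by simp) ?_
    simp only [List.length_append, List.length_singleton, List.range_succ (n := xs.length + 1),
      List.map_append]
    congr 1
    · apply List.map_congr_left
      intro i hi
      have : i ≤ xs.length := by simpa [Nat.lt_succ_iff] using List.mem_range.mp hi
      rw [List.take_append_of_le_length this]
    · simp

lemma pvPrefixGet (w : Char → Int) (xs : List Char) (l : Int) (h0 : 0 ≤ l)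
    (h1 : l ≤ (xs.length : Int)) :
    (PySem.List.pyGet?
        ((List.range (xs.length + 1)).map (fun i => ((xs.take i).map w).sum)) l).getD 0
      = pvWsum w xs l := by
  have : l = ((l.toNat : Nat) : Int) := by omega
  rw [this, PySem.List.pyGet?_natCast]
  rw [List.getElem?_map, List.getElem?_range (by omega : l.toNat < xs.length + 1)]
  simp only [Option.map_some, Option.getD_some, pvWsum, Int.toNat_natCast]

lemma pvLoopA_spec (table : List Int) (xs : List Char) (py m n : Int) (hm : 0 ≤ m)
    (hn : m < n → n ≤ (xs.length : Int)) :
    ∀ (fuel : Nat) (r l d : Int) (acc : List Int), m ≤ r → l = r - m →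
      d = pvWsum (pvW table) xs r - pvWsum (pvW table) xs l - py → (n - r).toNat ≤ fuel →
      pvLoopA table xs n r l d acc
        = acc ++ (PySem.List.pyRange (l + 1) (n - m + 1) 1).filter
            (fun q => pvWsum (pvW table) xs (q + m) - pvWsum (pvW table) xs q == py) := by
  intro fuel
  induction fuel with
  | zero =>
    intro r l d acc hmr hl hd hfuel
    rw [pvLoopA, dif_neg (by omega)]
    rw [PySem.List.pyRange_one_eq_nil (by omega : n - m + 1 ≤ l + 1)]
    simp
  | succ fuel ih =>
    intro r l d acc hmr hl hd hfuel
    by_cases hr : r < n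
    · rw [pvLoopA, dif_pos hr]
      have hlen : n ≤ (xs.length : Int) := hn (by omega)
      have h0r : (0:Int) ≤ r := by omega
      have hrlen : r.toNat < xs.length := by omega
      have h0l : (0:Int) ≤ l := by omega
      have hllen : l.toNat < xs.length := by omega
      have hd' : d + (pvCharW table xs r - pvCharW table xs l)
          = pvWsum (pvW table) xs (r + 1) - pvWsum (pvW table) xs (l + 1) - py := by
        rw [pvCharW_eq table xs r h0r hrlen, pvCharW_eq table xs l h0l hllen,
          pvWsum_step (pvW table) xs r h0r hrlen, pvWsum_step (pvW table) xs l h0l hllen, hd]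
        ring
      rw [ih (r + 1) (l + 1) _ _ (by omega) (by omega) hd' (by omega)]
      rw [PySem.List.pyRange_one_cons (by omega : l + 1 < n - m + 1), List.filter_cons]
      have hq : l + 1 + m = r + 1 := by omega
      by_cases hz : d + (pvCharW table xs r - pvCharW table xs l) = 0
      · rw [if_pos hz]
        have : (pvWsum (pvW table) xs (l + 1 + m) - pvWsum (pvW table) xs (l + 1) == py) = true := by
          rw [hq]; rw [hd'] at hz; simpa using (by omega : pvWsum (pvW table) xs (r + 1) - pvWsum (pvW table) xs (l + 1) = py)
        rw [if_pos this]
        simp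
      · rw [if_neg hz]
        have : (pvWsum (pvW table) xs (l + 1 + m) - pvWsum (pvW table) xs (l + 1) == py) = false := by
          rw [hq]; rw [hd'] at hz
          simpa using (by omega : ¬ pvWsum (pvW table) xs (r + 1) - pvWsum (pvW table) xs (l + 1) = py)
        rw [if_neg (by simp [this])]
    · rw [pvLoopA, dif_neg hr]
      rw [PySem.List.pyRange_one_eq_nil (by omega : n - m + 1 ≤ l + 1)]
      simp

-- ===== VERDICT (by name: the statement is the Claim_ definition above) =====
theorem tableCountingAbelianMatchingAlphabetReducedRedux_spec : Claim_equal_tableCountingAbelianMatchingAlphabetReducedRedux := by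
  intro y x m n _hdom hpre
  obtain ⟨hm0, hmy, hmxl, himp, _, _⟩ := hpre
  unfold Spec_tableCountingAbelianMatchingAlphabetReducedRedux
  unfold tableCountingAbelianMatchingAlphabetReducedRedux
    tableCountingAbelianMatchingAlphabetReducedRedux_alt
  simp only []
  set table := computeTableMapping (PySem.List.sorted (PySem.Set.ofList x.toList) (fun c => c) false) with htable
  set xs := x.toList
  set ys := y.toList
  have hmx : m.toNat ≤ xs.length := by omega
  have hmy' : m.toNat ≤ ys.length := by omega
  have hmcast : ((m.toNat : Nat) : Int) = m := by omega
  -- A's counting for-loop and B's patternSum loop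
  rw [PySem.List.foldl_prod_mk (fun a i => a + pvCharW table xs i)
      (fun b i => b + pvCharW table ys i) (PySem.List.pyRange 0 m 1) 0 0]
  rw [PySem.List.foldl_add _ (fun i => pvCharW table xs i) 0,
      PySem.List.foldl_add _ (fun i => pvCharW table ys i) 0]
  simp only []
  rw [← hmcast, pvMapRangeNat table xs m.toNat hmx, pvMapRangeNat table ys m.toNat hmy']
  -- B's prefix list
  rw [pvPrefixFold (pvW table) xs]
  simp only []
  set py : Int := 0 + ((ys.take m.toNat).map (pvW table)).sum with hpy
  set Wm : Int := 0 + ((xs.take m.toNat).map (pvW table)).sum with hWm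
  -- B's first-window lookup prefix[m]
  have hget : (PySem.List.pyGet?
      ((List.range (xs.length + 1)).map (fun i => ((xs.take i).map (pvW table)).sum))
      ((m.toNat : Nat) : Int)).getD 0 = ((xs.take m.toNat).map (pvW table)).sum := by
    rw [pvPrefixGet (pvW table) xs _ (by omega) (by omega)]
    simp only [pvWsum, Int.toNat_natCast]
  -- B's filter predicate in terms of pvWsum
  have hfilter :
      (PySem.List.pyRange 1 (n - ((m.toNat : Nat) : Int) + 1) 1).filter
        (fun l => (PySem.List.pyGet?
            ((List.range (xs.length + 1)).map (fun i => ((xs.take i).map (pvW table)).sum)) (l + ((m.toNat : Nat) : Int))).getD 0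
          - (PySem.List.pyGet?
            ((List.range (xs.length + 1)).map (fun i => ((xs.take i).map (pvW table)).sum)) l).getD 0 == py)
      = (PySem.List.pyRange 1 (n - m + 1) 1).filter
        (fun q => pvWsum (pvW table) xs (q + m) - pvWsum (pvW table) xs q == py) := by
    rw [hmcast]
    refine List.filter_congr ?_
    intro q hq
    have hmem := (PySem.List.mem_pyRange_one).mp hq
    have hnx : n ≤ (xs.length : Int) := himp (by omega)
    rw [pvPrefixGet (pvW table) xs (q + m) (by omega) (by omega),
      pvPrefixGet (pvW table) xs q (by omega) (by omega)]
  rw [hget, hfilter, hmcast]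
  -- A's while-loop
  have hd0 : Wm - py = pvWsum (pvW table) xs m - pvWsum (pvW table) xs 0 - py := by
    rw [pvWsum_zero, hWm, pvWsum]
    ring
  have hloop := pvLoopA_spec table xs py m n hm0 himp (n - m).toNat m 0 (Wm - py)
    (if Wm - py = 0 then [0] else []) le_rfl (by omega) hd0 (by omega)
  rw [hloop, show (0 : Int) + 1 = 1 from by ring]
  congr 1
  by_cases hz : Wm - py = 0
  · rw [if_pos hz, if_pos (by simpa using (by omega : ((xs.take m.toNat).map (pvW table)).sum = py))]
  · rw [if_neg hz, if_neg (by simpa using (by omega : ¬ ((xs.take m.toNat).map (pvW table)).sum = py))]
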